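-- pv_equiv track=rewrite | github.com/Anjan50/Python | Basic Programs/Bouncy Number.py | isBouncy
-- ===== SOURCE A (Python) =====
-- def isBouncy(num : int)-> bool:
--
-- 	if num < 100:
-- 		return False
--
-- 	h = 0
-- 	for i in str(num):
-- 		i = int(i)
-- 		if h > i:
-- 			return False
-- 		h = i
-- 		#h Becomes Storage For Prev Digit
-- 	return True
-- ===== SOURCE B (Python) =====
-- def isBouncy(num: int) -> bool:
--     s = str(num)
--     return num >= 100 and list(s) == sorted(s)
-- ===== Notes on version B (the rewrite author's own statement) =====
-- stated objective: idiomatic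
-- what changed: B replaces the explicit left-to-right scan that tracks the previous digit (with per-character int() conversion and early return) by comparing the digit string to its sorted permutation, guarded by num >= 100.
import Mathlib
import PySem

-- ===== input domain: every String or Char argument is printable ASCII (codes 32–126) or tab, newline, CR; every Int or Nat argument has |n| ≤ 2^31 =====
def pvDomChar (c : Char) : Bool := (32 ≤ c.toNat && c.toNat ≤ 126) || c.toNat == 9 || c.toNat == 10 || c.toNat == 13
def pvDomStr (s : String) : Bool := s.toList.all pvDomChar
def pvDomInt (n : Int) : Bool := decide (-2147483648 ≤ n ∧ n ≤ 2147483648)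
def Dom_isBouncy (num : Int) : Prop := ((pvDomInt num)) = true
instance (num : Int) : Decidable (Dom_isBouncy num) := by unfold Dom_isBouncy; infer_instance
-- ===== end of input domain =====

-- B checks non-decreasing digits by comparing str(num) with its sorted permutation instead of A's previous-digit scan; same results, more idiomatic.


-- ===== PORT A =====
-- 'for i in str(num): i = int(i); if h > i: return False; h = i'.
-- int(i) never raises here (the loop only runs for num ≥ 100, whose str is digit chars), so '.getD 0' is exact.
def isBouncyLoop : Int → List Char → Bool
  | _, [] => true
  | h, c :: cs =>
    let i : Int := (PySem.Int.ofChars? [c]).getD 0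
    if h > i then false else isBouncyLoop i cs

def isBouncy (num : Int) : Bool :=
  if num < 100 then false
  else isBouncyLoop 0 (PySem.Int.toChars num)

-- ===== PORT B =====
def isBouncy_alt (num : Int) : Bool :=
  let s := PySem.Int.toChars num
  decide (100 ≤ num) && decide (s = PySem.List.sorted s (fun x => x) false)

-- ===== PRECONDITION & SPEC =====
def Spec_isBouncy (num : Int) (out : Bool) : Prop := out = isBouncy_alt num
instance (num : Int) (out : Bool) : Decidable (Spec_isBouncy num out) := by unfold Spec_isBouncy; infer_instance

-- ===== CLAIM (what is proved, stated in full; the proofs are below) =====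
def Claim_equal_isBouncy : Prop := ∀ (num : Int), Dom_isBouncy num → Spec_isBouncy num (isBouncy num)

-- ===== LEMMAS AND PROOFS =====

-- int() of a single digit character
lemma pvDigVal (c : Char) (h1 : 48 ≤ c.toNat) (h2 : c.toNat ≤ 57) :
    PySem.Int.ofChars? [c] = some ((c.toNat : Int) - 48) := by
  obtain ⟨n, hn, rfl⟩ : ∃ n, (48 ≤ n ∧ n ≤ 57) ∧ c = Char.ofNat n :=
    ⟨c.toNat, ⟨h1, h2⟩, (Char.ofNat_toNat c).symm⟩
  obtain ⟨hn1, hn2⟩ := hn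
  interval_cases n <;> decide

-- every character produced by Nat.toDigitsCore in base 10 (over digit seeds) is a decimal digit
lemma pvToDigitsCoreDigits : ∀ (fuel n : Nat) (ds : List Char),
    (∀ c ∈ ds, 48 ≤ c.toNat ∧ c.toNat ≤ 57) →
    ∀ c ∈ Nat.toDigitsCore 10 fuel n ds, 48 ≤ c.toNat ∧ c.toNat ≤ 57 := by
  intro fuel
  induction fuel with
  | zero => intro n ds hds c hc; exact hds c hc
  | succ f ih =>
    intro n ds hds c hc
    have hdig : 48 ≤ (Nat.digitChar (n % 10)).toNat ∧ (Nat.digitChar (n % 10)).toNat ≤ 57 := by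
      have hm : n % 10 < 10 := Nat.mod_lt _ (by norm_num)
      generalize n % 10 = m at hm ⊢
      interval_cases m <;> decide
    have hds' : ∀ c ∈ (Nat.digitChar (n % 10)) :: ds, 48 ≤ c.toNat ∧ c.toNat ≤ 57 := by
      intro c hc
      rcases hc with _ | hc
      · exact hdig
      · exact hds c (by assumption)
    simp only [Nat.toDigitsCore] at hc
    split at hc
    · exact hds' c hc
    · exact ih _ _ hds' c hc

lemma pvCharLe (a b : Char) : a ≤ b ↔ a.toNat ≤ b.toNat := by
  constructor <;> intro h <;> exact h

-- A's scan is the chain condition on digit values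
lemma pvLoopChain (l : List Char) (hd : ∀ c ∈ l, 48 ≤ c.toNat ∧ c.toNat ≤ 57) :
    ∀ h : Int, isBouncyLoop h l = true ↔
      List.IsChain (· ≤ ·) (h :: l.map (fun c => (c.toNat : Int) - 48)) := by
  induction l with
  | nil => intro h; simp [isBouncyLoop]
  | cons c cs ih =>
    intro h
    have hc := hd c (by simp)
    have hval := pvDigVal c hc.1 hc.2
    have ih' := ih (fun x hx => hd x (by simp [hx]))
    simp only [isBouncyLoop, hval, Option.getD_some, List.map_cons, List.isChain_cons_cons]
    split_ifs with hlt
    · simp; omega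
    · rw [ih' ((c.toNat : Int) - 48)]
      constructor
      · intro hch; exact ⟨by omega, hch⟩
      · intro hch; exact hch.2

-- A's scan from 0 over a digit string is exactly "the characters are pairwise ≤"
lemma pvLoopPairwise (l : List Char) (hd : ∀ c ∈ l, 48 ≤ c.toNat ∧ c.toNat ≤ 57) :
    isBouncyLoop 0 l = true ↔ l.Pairwise (· ≤ ·) := by
  rw [pvLoopChain l hd 0, List.isChain_iff_pairwise, List.pairwise_cons, List.pairwise_map]
  constructor
  · intro h
    exact h.2.imp (fun {a b} hab => (pvCharLe a b).2 (by omega))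
  · intro h
    refine ⟨?_, h.imp (fun {a b} hab => by have := (pvCharLe a b).1 hab; omega)⟩
    intro x hx
    simp only [List.mem_map] at hx
    obtain ⟨c, hc, rfl⟩ := hx
    have := (hd c hc).1
    omega

lemma pvSortedEqIff (l : List Char) :
    l = PySem.List.sorted l (fun x => x) false ↔ l.Pairwise (· ≤ ·) := by
  constructor
  · intro h
    rw [h]
    exact PySem.List.sorted_pairwise l (fun x => x) (κ := Char)
  · intro h
    exact (PySem.List.sorted_eq_self_of_pairwise l (fun x => x) h).symm

-- ===== VERDICT (by name: the statement is the Claim_ definition above) =====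
theorem isBouncy_spec : Claim_equal_isBouncy := by
  intro num _
  unfold Spec_isBouncy isBouncy isBouncy_alt
  by_cases hlt : num < 100
  · simp [hlt, show ¬ (100 ≤ num) by omega]
  · have h100 : 100 ≤ num := by omega
    have hnn : ¬ num < 0 := by omega
    have hl : PySem.Int.toChars num = Nat.toDigits 10 num.toNat := by
      simp [PySem.Int.toChars, hnn]
    have hdig : ∀ c ∈ PySem.Int.toChars num, 48 ≤ c.toNat ∧ c.toNat ≤ 57 := by
      rw [hl]
      exact pvToDigitsCoreDigits _ _ [] (by simp)
    simp only [hlt, if_false, decide_eq_true h100, Bool.true_and]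
    rw [Bool.eq_iff_iff, pvLoopPairwise _ hdig, decide_eq_true_iff, pvSortedEqIff]
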